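-- pv_equiv track=rewrite | github.com/Bricktech2000/DBLess-Legacy | console/run.py | encode
-- ===== SOURCE A (Python) =====
-- import math
--
-- def encode(bytes):
--   out = ''
--   table = '0123456789abcdefghijklmnopqrstuvwxyzABCDEFGHIJKLMNOPQRSTUVWXYZ.-:+=^!/*?&<>()[]{}@%$#'
--   value = 0
--   for i in range(len(bytes)):
--     # make 32-bit integer
--     value = value * 256 + bytes[i]
--     if i % 4 == 3:
--       # convert to printable characters using Z85
--       divisor = int(math.pow(85, 4))
--       while divisor:
--         out += table[value // divisor % 85]
--         divisor //= 85
--       value = 0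
--   return out
-- ===== SOURCE B (Python) =====
-- def encode(bytes):
--   table = '0123456789abcdefghijklmnopqrstuvwxyzABCDEFGHIJKLMNOPQRSTUVWXYZ.-:+=^!/*?&<>()[]{}@%$#'
--   out = []
--   n = len(bytes) // 4
--   for g in range(n):
--     value = 0
--     for j in range(4):
--       value = value * 256 + bytes[4 * g + j]
--     digits = []
--     for _ in range(5):
--       digits.append(table[value % 85])
--       value //= 85
--     digits.reverse()
--     out += digits
--   return ''.join(out)
-- ===== Notes on version B (the rewrite author's own statement) =====
-- stated objective: alternative
-- what changed: A's single index loop with an i%4 state machine and descending-divisor digit extraction is replaced by explicit per-4-byte-group loops that extract the five base-85 digits least-significant-first with %85 // 85 and reverse them, joining the pieces at the end.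
import Mathlib
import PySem

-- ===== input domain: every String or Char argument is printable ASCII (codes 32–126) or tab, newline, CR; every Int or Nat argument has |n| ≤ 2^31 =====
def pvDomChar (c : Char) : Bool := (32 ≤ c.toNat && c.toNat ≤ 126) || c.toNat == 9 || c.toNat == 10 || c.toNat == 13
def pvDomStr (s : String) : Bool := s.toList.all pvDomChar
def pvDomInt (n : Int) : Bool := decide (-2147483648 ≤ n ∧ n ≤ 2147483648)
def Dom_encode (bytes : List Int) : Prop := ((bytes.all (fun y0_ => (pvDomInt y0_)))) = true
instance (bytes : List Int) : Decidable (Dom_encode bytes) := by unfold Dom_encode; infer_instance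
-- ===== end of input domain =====

-- B replaces A's single index loop with its i%4 state machine and descending-divisor digit
-- extraction by explicit per-4-byte-group loops that take the five base-85 digits
-- least-significant-first (%85, //85) and reverse them (alternative decomposition, same cost).

-- ===== PORT A =====
def tableA : List Char := "0123456789abcdefghijklmnopqrstuvwxyzABCDEFGHIJKLMNOPQRSTUVWXYZ.-:+=^!/*?&<>()[]{}@%$#".toList

-- A's inner `while divisor:` loop; divisor is a nonnegative Python int (85^4, then //= 85),
-- modeled as Nat so Python's // on it is Nat division; the table index `value // divisor % 85`
-- is always in [0, 85), so the pyGetD default is unreachable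
def encodeWhile (value : Int) (divisor : Nat) (out : List Char) : List Char :=
  if divisor ≠ 0 then
    encodeWhile value (divisor / 85) (out ++ [PySem.List.pyGetD tableA (PySem.Int.mod (PySem.Int.floordiv value (divisor : Int)) 85) ' '])
  else out
termination_by divisor
decreasing_by exact Nat.div_lt_self (Nat.pos_of_ne_zero (by assumption)) (by norm_num)

def encode (bytes : List Int) : String :=
  String.ofList ((PySem.List.pyRange 0 (bytes.length : Int) 1).foldl
    (fun (s : List Char × Int) (i : Int) =>
      let value := s.2 * 256 + PySem.List.pyGetD bytes i 0
      if PySem.Int.mod i 4 = 3 then (encodeWhile value 52200625 s.1, 0) else (s.1, value))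
    ([], 0)).1

-- ===== PORT B =====
def tableB : List Char := "0123456789abcdefghijklmnopqrstuvwxyzABCDEFGHIJKLMNOPQRSTUVWXYZ.-:+=^!/*?&<>()[]{}@%$#".toList

-- the table index `value % 85` is always in [0, 85), so the pyGetD default is unreachable
def encode_alt (bytes : List Int) : String :=
  let n := PySem.Int.floordiv (bytes.length : Int) 4
  String.ofList ((PySem.List.pyRange 0 n 1).foldl
    (fun (out : List Char) (g : Int) =>
      let value := (PySem.List.pyRange 0 4 1).foldl
        (fun (v : Int) (j : Int) => v * 256 + PySem.List.pyGetD bytes (4 * g + j) 0) 0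
      let dv := (PySem.List.pyRange 0 5 1).foldl
        (fun (s : List Char × Int) (_ : Int) =>
          (s.1 ++ [PySem.List.pyGetD tableB (PySem.Int.mod s.2 85) ' '], PySem.Int.floordiv s.2 85))
        ([], value)
      out ++ dv.1.reverse)
    [])

-- ===== PRECONDITION & SPEC =====
def Spec_encode (bytes : List Int) (out : String) : Prop := out = encode_alt bytes
instance (bytes : List Int) (out : String) : Decidable (Spec_encode bytes out) := by unfold Spec_encode; infer_instance

-- ===== CLAIM (what is proved, stated in full; the proofs are below) =====
def Claim_equal_encode : Prop := ∀ (bytes : List Int), Dom_encode bytes → Spec_encode bytes (encode bytes)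

-- ===== LEMMAS AND PROOFS =====

-- common characterization: the concatenated 5-digit base-85 blocks of the complete 4-byte groups
def digs (v : Int) : List Char :=
  [PySem.List.pyGetD tableA (PySem.Int.mod (PySem.Int.floordiv v 52200625) 85) ' ',
   PySem.List.pyGetD tableA (PySem.Int.mod (PySem.Int.floordiv v 614125) 85) ' ',
   PySem.List.pyGetD tableA (PySem.Int.mod (PySem.Int.floordiv v 7225) 85) ' ',
   PySem.List.pyGetD tableA (PySem.Int.mod (PySem.Int.floordiv v 85) 85) ' ',
   PySem.List.pyGetD tableA (PySem.Int.mod v 85) ' ']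

def chunks : List Int → List Char
  | a :: b :: c :: d :: rest => digs (((a * 256 + b) * 256 + c) * 256 + d) ++ chunks rest
  | _ => []

-- A's while loop emits exactly the 5 digits, most significant first
theorem encodeWhile_eval (v : Int) (out : List Char) :
    encodeWhile v 52200625 out = out ++ digs v := by
  rw [encodeWhile]; norm_num
  rw [encodeWhile]; norm_num
  rw [encodeWhile]; norm_num
  rw [encodeWhile]; norm_num
  rw [encodeWhile]; norm_num
  rw [encodeWhile]; norm_num
  simp [digs, PySem.Int.floordiv_eq_ediv_of_pos, PySem.Int.mod_eq_emod_of_pos]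

-- B's 5-step %85//85 loop, reversed, emits the same 5 digits
theorem bdigits_eq (v : Int) :
    ((PySem.List.pyRange 0 5 1).foldl (fun (s : List Char × Int) (_ : Int) =>
      (s.1 ++ [PySem.List.pyGetD tableB (PySem.Int.mod s.2 85) ' '], PySem.Int.floordiv s.2 85)) ([], v)).1.reverse = digs v := by
  have hr : PySem.List.pyRange 0 5 1 = [0, 1, 2, 3, 4] := by decide
  rw [hr]
  simp only [List.foldl]
  have ht : tableB = tableA := rfl
  simp [ht, digs, PySem.Int.floordiv_eq_ediv_of_pos, PySem.Int.mod_eq_emod_of_pos,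
    Int.ediv_ediv_of_nonneg (by norm_num : (0:Int) ≤ 85)]
  constructor <;> rw [Int.ediv_ediv_of_nonneg (by norm_num)] <;> norm_num

-- the body of A's loop, as a named function
def stepA (bs : List Int) (s : List Char × Int) (i : Int) : List Char × Int :=
  let value := s.2 * 256 + PySem.List.pyGetD bs i 0
  if PySem.Int.mod i 4 = 3 then (encodeWhile value 52200625 s.1, 0) else (s.1, value)

theorem A_loop (xs : List Int) : ∀ (pre : List Int) (out : List Char),
    pre.length % 4 = 0 →
    ((List.range' pre.length xs.length 1).foldl (fun s (j : Nat) => stepA (pre ++ xs) s ↑j) (out, 0)).1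
      = out ++ chunks xs := by
  induction xs using chunks.induct with
  | case1 a b c d rest ih =>
    intro pre out h
    have h4 : ∀ j : Nat, PySem.Int.mod ((pre.length + j : Nat) : Int) 4 = ((j % 4 : Nat) : Int) := by
      intro j
      rw [PySem.Int.mod_eq_emod_of_pos (by norm_num)]
      omega
    have hget : ∀ j : Nat, PySem.List.pyGetD (pre ++ (a :: b :: c :: d :: rest)) ((pre.length + j : Nat) : Int) 0 = (a :: b :: c :: d :: rest).getD j 0 := by
      intro j
      rw [PySem.List.pyGetD_natCast, List.getD_append_right _ _ _ _ (by omega)]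
      congr 1; omega
    have hget0 : PySem.List.pyGetD (pre ++ (a :: b :: c :: d :: rest)) ((pre.length : Nat) : Int) 0 = a := by
      have h0 := hget 0; rw [Nat.add_zero] at h0; exact h0
    have h40 : PySem.Int.mod ((pre.length : Nat) : Int) 4 = 0 := by
      rw [PySem.Int.mod_eq_emod_of_pos (by norm_num)]; omega
    have hr : List.range' pre.length (a :: b :: c :: d :: rest).length 1
        = pre.length :: (pre.length + 1) :: (pre.length + 2) :: (pre.length + 3) :: List.range' (pre.length + 4) rest.length 1 := by
      simp only [List.length_cons]
      rw [show rest.length + 1 + 1 + 1 + 1 = rest.length + 3 + 1 by omega, List.range'_succ,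
          show rest.length + 3 = rest.length + 2 + 1 by omega, List.range'_succ,
          show rest.length + 2 = rest.length + 1 + 1 by omega, List.range'_succ, List.range'_succ]
    rw [hr]
    simp only [List.foldl_cons]
    simp only [stepA, hget0, hget 1, hget 2, hget 3, h40, h4 1, h4 2, h4 3]
    norm_num
    rw [encodeWhile_eval]
    have hre : pre ++ a :: b :: c :: d :: rest = (pre ++ [a, b, c, d]) ++ rest := by simp
    have hlen : pre.length + 4 = (pre ++ [a, b, c, d]).length := by simp
    rw [hre, hlen]
    have ih' := ih (pre ++ [a, b, c, d]) (out ++ digs (((a * 256 + b) * 256 + c) * 256 + d)) (by simp; omega)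
    simp only [stepA] at ih'
    norm_num at ih' ⊢
    rw [ih']
    simp [chunks]
  | case2 xs hne =>
    intro pre out h
    have hne3 : ∀ j : Nat, j < 3 → ¬ (PySem.Int.mod ((pre.length + j : Nat) : Int) 4 = 3) := by
      intro j hj
      rw [PySem.Int.mod_eq_emod_of_pos (by norm_num)]
      omega
    have hne0 : ¬ (PySem.Int.mod ((pre.length : Nat) : Int) 4 = 3) := by
      rw [PySem.Int.mod_eq_emod_of_pos (by norm_num)]; omega
    match xs, hne with
    | a :: b :: c :: d :: rest, hn => exact (hn a b c d rest rfl).elim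
    | [], _ => simp [chunks]
    | [a], _ =>
      simp only [List.length_cons, List.length_nil, show (0:Nat) + 1 = 1 from rfl,
        List.range'_one, List.foldl_cons, List.foldl_nil, stepA]
      rw [if_neg hne0]
      simp [chunks]
    | [a, b], _ =>
      simp only [List.length_cons, List.length_nil,
        show (0:Nat) + 1 + 1 = 1 + 1 from rfl, List.range'_succ, List.range'_one,
        List.foldl_cons, stepA]
      rw [if_neg hne0, if_neg (hne3 1 (by omega))]
      simp [chunks]
    | [a, b, c], _ =>
      simp only [List.length_cons, List.length_nil,
        show (0:Nat) + 1 + 1 + 1 = 2 + 1 from rfl, show (2:Nat) = 1 + 1 from rfl,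
        List.range'_succ, List.foldl_cons, stepA]
      rw [if_neg hne0, if_neg (hne3 1 (by omega)), if_neg (hne3 2 (by omega))]
      simp [chunks]

theorem encodeA_chunks (bytes : List Int) : encode bytes = String.ofList (chunks bytes) := by
  unfold encode
  rw [PySem.List.pyRange_zero_natCast, List.foldl_map, List.range_eq_range']
  have h := A_loop bytes [] [] (by simp)
  simp only [List.nil_append, List.length_nil] at h
  exact congrArg String.ofList h

-- the body of B's outer loop, as a named function
def grpB (bs : List Int) (g : Int) : List Char :=
  let value := (PySem.List.pyRange 0 4 1).foldl
    (fun (v : Int) (j : Int) => v * 256 + PySem.List.pyGetD bs (4 * g + j) 0) 0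
  let dv := (PySem.List.pyRange 0 5 1).foldl
    (fun (s : List Char × Int) (_ : Int) =>
      (s.1 ++ [PySem.List.pyGetD tableB (PySem.Int.mod s.2 85) ' '], PySem.Int.floordiv s.2 85))
    ([], value)
  dv.1.reverse

theorem grpB_eval (pre : List Int) (a b c d : Int) (rest : List Int) (h : pre.length % 4 = 0) :
    grpB (pre ++ a :: b :: c :: d :: rest) ((pre.length / 4 : Nat) : Int)
      = digs (((a * 256 + b) * 256 + c) * 256 + d) := by
  have hr4 : PySem.List.pyRange 0 4 1 = [0, 1, 2, 3] := by decide
  have hidx : ∀ (jz : Int) (j : Nat), jz = (j : Int) → j < 4 →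
      PySem.List.pyGetD (pre ++ a :: b :: c :: d :: rest) (4 * ((pre.length / 4 : Nat) : Int) + jz) 0
        = (a :: b :: c :: d :: rest).getD j 0 := by
    intro jz j hz hj
    rw [hz, show 4 * ((pre.length / 4 : Nat) : Int) + (j : Int) = ((pre.length + j : Nat) : Int) by push_cast; omega]
    rw [PySem.List.pyGetD_natCast, List.getD_append_right _ _ _ _ (by omega)]
    congr 1; omega
  unfold grpB
  rw [hr4]
  simp only [List.foldl_cons, List.foldl_nil]
  rw [hidx 0 0 (by norm_num) (by omega), hidx 1 1 (by norm_num) (by omega),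
      hidx 2 2 (by norm_num) (by omega), hidx 3 3 (by norm_num) (by omega)]
  rw [bdigits_eq]
  norm_num

theorem B_loop (xs : List Int) : ∀ (pre : List Int) (out : List Char),
    pre.length % 4 = 0 →
    (List.range' (pre.length / 4) (xs.length / 4) 1).foldl
      (fun (o : List Char) (g : Nat) => o ++ grpB (pre ++ xs) ↑g) out = out ++ chunks xs := by
  induction xs using chunks.induct with
  | case1 a b c d rest ih =>
    intro pre out h
    rw [show (a :: b :: c :: d :: rest).length / 4 = rest.length / 4 + 1 by simp only [List.length_cons]; omega,
        List.range'_succ, List.foldl_cons, grpB_eval pre a b c d rest h]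
    have hre : pre ++ a :: b :: c :: d :: rest = (pre ++ [a, b, c, d]) ++ rest := by simp
    rw [hre, show pre.length / 4 + 1 = (pre ++ [a, b, c, d]).length / 4 by simp only [List.length_append, List.length_cons, List.length_nil]; omega,
        ih (pre ++ [a, b, c, d]) (out ++ digs (((a * 256 + b) * 256 + c) * 256 + d)) (by simp only [List.length_append, List.length_cons, List.length_nil]; omega)]
    simp [chunks]
  | case2 xs hne =>
    intro pre out h
    match xs, hne with
    | a :: b :: c :: d :: rest, hn => exact (hn a b c d rest rfl).elim
    | [], _ => simp [chunks]
    | [a], _ => simp [chunks]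
    | [a, b], _ => simp [chunks]
    | [a, b, c], _ => simp [chunks]

theorem encodeB_chunks (bytes : List Int) : encode_alt bytes = String.ofList (chunks bytes) := by
  simp only [encode_alt]
  rw [show PySem.Int.floordiv (bytes.length : Int) 4 = ((bytes.length / 4 : Nat) : Int) by
        rw [PySem.Int.floordiv_eq_ediv_of_pos (by norm_num)]; omega]
  rw [PySem.List.pyRange_zero_natCast, List.foldl_map, List.range_eq_range']
  have h := B_loop bytes [] [] (by simp)
  simp only [List.nil_append, List.length_nil, Nat.zero_div] at h
  exact congrArg String.ofList h

-- ===== VERDICT (by name: the statement is the Claim_ definition above) =====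
theorem encode_spec : Claim_equal_encode := by
  intro bytes _
  unfold Spec_encode
  rw [encodeA_chunks, encodeB_chunks]
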